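-- pv_equiv track=rewrite | github.com/drizztSun/common_project | PythonLeetcode/Leetcode/1559_DetectCyclesIn2DGrid.py | doit_disjoint
-- ===== SOURCE A (Python) =====
-- def doit_disjoint(grid: list) -> bool:
--
--     m, n = len(grid), len(grid[0])
--     parent = [i for i in range(n*m+1)]
--
--     def find(i):
--         while parent[i] != i:
--             parent[i] = parent[parent[i]]
--             i = parent[i]
--         return i
--
--     def union(i, j):
--         pa, pb = find(i), find(j)
--         parent[pa] = pb
--         return pa == pb
--
--     for i in range(m):
--         for j in range(n):
--             base = i * n + j
--             if i < m-1 and grid[i+1][j] == grid[i][j] and union(base, base+n):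
--                 return True
--
--             if j < n-1 and grid[i][j+1] == grid[i][j] and union(base, base+1):
--                 return True
--
--     return False
-- ===== SOURCE B (Python) =====
-- def doit_disjoint(grid: list) -> bool:
--     m, n = len(grid), len(grid[0])
--     edges = [e for i in range(m) for j in range(n)
--              for e in (([(i * n + j, (i + 1) * n + j)]
--                         if i + 1 < m and grid[i + 1][j] == grid[i][j] else [])
--                        + ([(i * n + j, i * n + j + 1)]
--                           if j + 1 < n and grid[i][j + 1] == grid[i][j] else []))]
--     comp = list(range(m * n))
--     for a, b in edges:
--         ca, cb = comp[a], comp[b]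
--         if ca == cb:
--             return True
--         comp = [cb if c == ca else c for c in comp]
--     return False
-- ===== Notes on version B (the rewrite author's own statement) =====
-- stated objective: simpler
-- what changed: Replaces the path-compressed union-find forest (find/union with parent-pointer chasing and in-place compression) by a flat component-label array: edges between equal-valued orthogonal neighbours are collected once, then each edge either closes a cycle (equal labels) or merges the two components by rewriting one label over the array.
-- outside the precondition, e.g. on doit_disjoint([['a', 'a'], ['a', 'a'], ['x']]): A returns True, B raises IndexError
import Mathlib
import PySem

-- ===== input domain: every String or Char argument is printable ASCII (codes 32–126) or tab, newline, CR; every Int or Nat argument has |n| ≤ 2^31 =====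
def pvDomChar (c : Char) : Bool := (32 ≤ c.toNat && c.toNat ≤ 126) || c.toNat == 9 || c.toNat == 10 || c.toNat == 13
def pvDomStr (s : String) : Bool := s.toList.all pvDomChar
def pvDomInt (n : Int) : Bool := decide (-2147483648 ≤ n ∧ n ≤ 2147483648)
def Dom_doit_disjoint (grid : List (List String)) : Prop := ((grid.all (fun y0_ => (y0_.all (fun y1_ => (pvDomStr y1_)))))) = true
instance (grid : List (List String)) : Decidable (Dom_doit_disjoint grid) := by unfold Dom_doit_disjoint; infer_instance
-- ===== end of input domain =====

-- B replaces A's path-compressed union-find forest by a flat component-label array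
-- rewritten on every merge (objective: simpler; not faster).

-- grid[i][j] for indices that are in range under Pre_
def pvGet (grid : List (List String)) (i j : Nat) : String :=
  (grid.getD i []).getD j ""

-- ===== PORT A =====
-- find(i) with path compression; fuel only makes the Python while-loop total
-- (under Pre_ the invariant proved below shows fuel = parent.length is never exhausted)
def findA : List Nat → Nat → Nat → List Nat × Nat
  | p, i, 0 => (p, i)
  | p, i, fuel+1 =>
    if p.getD i 0 = i then (p, i)
    else
      let p' := p.set i (p.getD (p.getD i 0) 0)
      findA p' (p'.getD i 0) fuel

def unionA (p : List Nat) (i j : Nat) : List Nat × Bool :=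
  let r1 := findA p i p.length
  let r2 := findA r1.1 j r1.1.length
  (r2.1.set r1.2 r2.2, r1.2 == r2.2)

-- the body of the double loop at cell (i, j): first the downward edge, then the right edge
def cellDown (grid : List (List String)) (m n : Nat) (p : List Nat) (i j : Nat) : List Nat × Bool :=
  if i < m - 1 ∧ pvGet grid (i+1) j = pvGet grid i j then unionA p (i*n+j) (i*n+j+n)
  else (p, false)

def cellRight (grid : List (List String)) (n : Nat) (p : List Nat) (i j : Nat) : List Nat × Bool :=
  if j < n - 1 ∧ pvGet grid i (j+1) = pvGet grid i j then unionA p (i*n+j) (i*n+j+1)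
  else (p, false)

-- the nested for-loops, flattened over the row-major list of cells, with early return
def goA (grid : List (List String)) (m n : Nat) : List Nat → List (Nat × Nat) → Bool
  | _, [] => false
  | p, (i, j) :: rest =>
    let d := cellDown grid m n p i j
    if d.2 then true
    else
      let r := cellRight grid n d.1 i j
      if r.2 then true
      else goA grid m n r.1 rest

def cellsList (m n : Nat) : List (Nat × Nat) :=
  (List.range m).flatMap fun i => (List.range n).map fun j => (i, j)

def doit_disjoint (grid : List (List String)) : Bool :=
  let m := grid.length
  let n := (grid.headI).length
  goA grid m n (List.range (n*m+1)) (cellsList m n)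

-- ===== PORT B =====
-- the edges contributed by cell (i, j) of the comprehension
def cellEdges (grid : List (List String)) (m n : Nat) (ij : Nat × Nat) : List (Nat × Nat) :=
  (if ij.1 + 1 < m ∧ pvGet grid (ij.1+1) ij.2 = pvGet grid ij.1 ij.2
   then [(ij.1*n+ij.2, (ij.1+1)*n+ij.2)] else []) ++
  (if ij.2 + 1 < n ∧ pvGet grid ij.1 (ij.2+1) = pvGet grid ij.1 ij.2
   then [(ij.1*n+ij.2, ij.1*n+ij.2+1)] else [])

def edgesB (grid : List (List String)) (m n : Nat) : List (Nat × Nat) :=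
  (List.range m).flatMap fun i => (List.range n).flatMap fun j => cellEdges grid m n (i, j)

-- the for-loop over edges with the flat label array
def goB : List Nat → List (Nat × Nat) → Bool
  | _, [] => false
  | comp, (a, b) :: rest =>
    let ca := comp.getD a 0
    let cb := comp.getD b 0
    if ca = cb then true
    else goB (comp.map fun c => if c = ca then cb else c) rest

def doit_disjoint_alt (grid : List (List String)) : Bool :=
  let m := grid.length
  let n := (grid.headI).length
  goB (List.range (m*n)) (edgesB grid m n)

-- ===== PRECONDITION & SPEC =====
-- Pre_ excludes the empty grid (A raises IndexError on grid[0]) and ragged grids with a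
-- row shorter than the first row, on which A raises IndexError mid-scan or, when a cycle
-- is found before the short row is touched, returns an early True that B (which inspects
-- every cell up front) cannot reach without raising.
def Pre_doit_disjoint (grid : List (List String)) : Prop :=
  grid ≠ [] ∧ ∀ row ∈ grid, (grid.headI).length ≤ row.length
instance (grid : List (List String)) : Decidable (Pre_doit_disjoint grid) := by
  unfold Pre_doit_disjoint; infer_instance

def pvWitness_doit_disjoint : List (List String) := [["a", "b"], ["b", "b"]]

def Spec_doit_disjoint (grid : List (List String)) (out : Bool) : Prop := out = doit_disjoint_alt grid
instance (grid : List (List String)) (out : Bool) : Decidable (Spec_doit_disjoint grid out) := by unfold Spec_doit_disjoint; infer_instance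

-- ===== CLAIM (what is proved, stated in full; the proofs are below) =====
def Claim_equal_doit_disjoint : Prop := ∀ (grid : List (List String)), Dom_doit_disjoint grid → Pre_doit_disjoint grid → Spec_doit_disjoint grid (doit_disjoint grid)

-- ===== LEMMAS AND PROOFS =====

-- parent-pointer step
def fp (p : List Nat) : Nat → Nat := fun x => p.getD x 0

-- a measure certifying that the parent forest is acyclic and closed
def Meas (p : List Nat) (d : Nat → Nat) : Prop :=
  ∀ i, i < p.length → p.getD i 0 < p.length ∧ (p.getD i 0 = i ∨ d (p.getD i 0) < d i)

-- r is the root of i's parent chain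
def IsRootOf (p : List Nat) (i r : Nat) : Prop :=
  ∃ k, (fp p)^[k] i = r ∧ p.getD r 0 = r

-- the simulation invariant: comp labels realize exactly the union-find partition
def UFSim (p comp : List Nat) (mn : Nat) : Prop :=
  p.length = mn + 1 ∧ comp.length = mn ∧ (∃ d, Meas p d) ∧
  ∀ a b, a < mn → b < mn →
    ((∃ r, IsRootOf p a r ∧ IsRootOf p b r) ↔ comp.getD a 0 = comp.getD b 0)


lemma getD_set' (p : List Nat) (i j v : Nat) :
    (p.set i v).getD j 0 = if i = j ∧ i < p.length then v else p.getD j 0 := by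
  simp only [List.getD_eq_getElem?_getD, List.getElem?_set]
  split_ifs with h1 h2 h3 <;> simp_all <;> omega

lemma getD_map_of_lt (f : Nat → Nat) (l : List Nat) (x : Nat) (h : x < l.length) :
    (l.map f).getD x 0 = f (l.getD x 0) := by
  simp [List.getD_eq_getElem?_getD, List.getElem?_map, List.getElem?_eq_getElem h]

lemma getD_range_of_lt {k i : Nat} (h : i < k) : (List.range k).getD i 0 = i := by
  simp [List.getD_eq_getElem?_getD, List.getElem?_range h]

lemma cell_lt {i j m n : Nat} (hi : i < m) (hj : j < n) : i * n + j < m * n :=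
  lt_of_lt_of_le (by rw [Nat.succ_mul]; omega : i * n + j < (i + 1) * n) (Nat.mul_le_mul_right n hi)

lemma iterate_fixed {p : List Nat} {r : Nat} (h : p.getD r 0 = r) (t : Nat) :
    (fp p)^[t] r = r := by
  induction t with
  | zero => rfl
  | succ t ih => rw [Function.iterate_succ_apply, show fp p r = r from h, ih]

lemma isRootOf_unique {p : List Nat} {i r r' : Nat}
    (h1 : IsRootOf p i r) (h2 : IsRootOf p i r') : r = r' := by
  obtain ⟨k, hk, hr⟩ := h1
  obtain ⟨k', hk', hr'⟩ := h2
  rcases le_total k k' with h | h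
  · have : (fp p)^[k' - k] ((fp p)^[k] i) = r' := by
      rw [← Function.iterate_add_apply]
      rwa [Nat.sub_add_cancel h]
    rw [hk, iterate_fixed hr] at this; exact this
  · have : (fp p)^[k - k'] ((fp p)^[k'] i) = r := by
      rw [← Function.iterate_add_apply]
      rwa [Nat.sub_add_cancel h]
    rw [hk', iterate_fixed hr'] at this; exact this.symm

lemma isRootOf_step {p : List Nat} {i r : Nat} (h : IsRootOf p i r) :
    IsRootOf p (p.getD i 0) r := by
  obtain ⟨k, hk, hr⟩ := h
  cases k with
  | zero =>
    subst hk
    exact ⟨0, by simpa [fp] using hr, hr⟩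
  | succ k =>
    exact ⟨k, by rw [Function.iterate_succ_apply] at hk; exact hk, hr⟩

lemma isRootOf_cons {p : List Nat} {i r : Nat} (h : IsRootOf p (p.getD i 0) r) :
    IsRootOf p i r := by
  obtain ⟨k, hk, hr⟩ := h
  exact ⟨k + 1, by rw [Function.iterate_succ_apply]; exact hk, hr⟩

lemma roots_exist {p : List Nat} {d : Nat → Nat} (hM : Meas p d) :
    ∀ i, i < p.length → ∃ r, IsRootOf p i r ∧ r < p.length := by
  intro i hi
  induction hn : d i using Nat.strong_induction_on generalizing i with
  | _ N ih =>
  subst hn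
  obtain ⟨hcl, hstep⟩ := hM i hi
  rcases hstep with h | h
  · exact ⟨i, ⟨0, rfl, h⟩, hi⟩
  · obtain ⟨r, hr, hrl⟩ := ih _ h _ hcl rfl
    exact ⟨r, isRootOf_cons hr, hrl⟩

lemma d_anti {p : List Nat} {d : Nat → Nat} (hM : Meas p d) {i : Nat} (hi : i < p.length) (t : Nat) :
    d ((fp p)^[t] i) ≤ d i ∧ (fp p)^[t] i < p.length := by
  induction t with
  | zero => exact ⟨le_rfl, hi⟩
  | succ t ih =>
    obtain ⟨hd, hl⟩ := ih
    obtain ⟨hcl, hstep⟩ := hM _ hl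
    rw [Function.iterate_succ_apply']
    rcases hstep with h | h
    · exact ⟨by rw [show fp p ((fp p)^[t] i) = (fp p)^[t] i from h]; exact hd,
        by rw [show fp p ((fp p)^[t] i) = (fp p)^[t] i from h]; exact hl⟩
    · exact ⟨le_of_lt (lt_of_lt_of_le h hd), hcl⟩

lemma same_root_iff {p : List Nat} {x y rx ry : Nat}
    (hrx : IsRootOf p x rx) (hry : IsRootOf p y ry) :
    (∃ r, IsRootOf p x r ∧ IsRootOf p y r) ↔ rx = ry :=
  ⟨fun ⟨r, h1, h2⟩ => (isRootOf_unique hrx h1).trans (isRootOf_unique hry h2).symm,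
   fun h => ⟨ry, h ▸ hrx, hry⟩⟩

lemma chain_short {p : List Nat} {d : Nat → Nat} (hM : Meas p d) {i r : Nat}
    (hi : i < p.length) (hr : IsRootOf p i r) :
    ∃ k, k < p.length ∧ (fp p)^[k] i = r := by
  obtain ⟨k0, hk0, hroot⟩ := hr
  have hex : ∃ t, p.getD ((fp p)^[t] i) 0 = (fp p)^[t] i := ⟨k0, by rw [hk0]; exact hroot⟩
  set km := Nat.find hex with hkm
  have hPkm := Nat.find_spec hex
  have hmin : ∀ t < km, p.getD ((fp p)^[t] i) 0 ≠ (fp p)^[t] i := fun t ht => Nat.find_min hex ht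
  have hkle : km ≤ k0 := Nat.find_min' hex (by rw [hk0]; exact hroot)
  -- value at km is r
  have hval : (fp p)^[km] i = r := by
    have : (fp p)^[k0 - km] ((fp p)^[km] i) = r := by
      rw [← Function.iterate_add_apply, Nat.sub_add_cancel hkle, hk0]
    rwa [iterate_fixed hPkm] at this
  -- d strictly decreases along the first km steps
  have hstep : ∀ t, t < km → d ((fp p)^[t+1] i) < d ((fp p)^[t] i) := by
    intro t ht
    have hl := (d_anti hM hi t).2
    have := (hM _ hl).2.resolve_left (hmin t ht)
    rw [Function.iterate_succ_apply']
    exact this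
  have hanti : ∀ t s, t < s → s ≤ km → d ((fp p)^[s] i) < d ((fp p)^[t] i) := by
    intro t s hts hs
    induction s with
    | zero => omega
    | succ s ih =>
      rcases Nat.lt_or_ge t s with h | h
      · exact lt_trans (hstep s (by omega)) (ih h (by omega))
      · have : t = s := by omega
        subst this; exact hstep t (by omega)
  -- pigeonhole
  have hinj : Set.InjOn (fun t => (fp p)^[t] i) (Finset.range (km+1)) := by
    intro t ht s hs hts
    simp only [Finset.coe_range, Set.mem_Iio] at ht hs
    have hts' : (fp p)^[t] i = (fp p)^[s] i := hts
    by_contra hne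
    rcases Nat.lt_or_ge t s with h | h
    · have := hanti t s h (by omega); rw [hts'] at this; omega
    · have := hanti s t (by omega) (by omega); rw [hts'] at this; omega
  have hcard := Finset.card_le_card_of_injOn (s := Finset.range (km+1))
    (t := Finset.range p.length) (fun t => (fp p)^[t] i)
    (fun t _ => Finset.mem_range.mpr (d_anti hM hi t).2) hinj
  simp only [Finset.card_range] at hcard
  exact ⟨km, by omega, hval⟩

lemma compress_preserve {p : List Nat} {d : Nat → Nat} (hM : Meas p d) {i : Nat}
    (hi : i < p.length) (hni : p.getD i 0 ≠ i) :
    Meas (p.set i (p.getD (p.getD i 0) 0)) d ∧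
    (∀ j r, j < p.length → IsRootOf p j r → IsRootOf (p.set i (p.getD (p.getD i 0) 0)) j r) := by
  set g := p.getD (p.getD i 0) 0 with hg
  have hpi : p.getD i 0 < p.length := (hM i hi).1
  have hdpi : d (p.getD i 0) < d i := (hM i hi).2.resolve_left hni
  have hgl : g < p.length := (hM _ hpi).1
  have hdg : d g < d i := by
    rcases (hM _ hpi).2 with h | h
    · rw [hg, h]; exact hdpi
    · exact lt_trans h hdpi
  have hget : ∀ j, (p.set i g).getD j 0 = if j = i then g else p.getD j 0 := by
    intro j
    rw [getD_set']
    by_cases h : j = i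
    · simp [h, hi]
    · rw [if_neg (fun hc => h hc.1.symm), if_neg h]
  constructor
  · intro j hj
    rw [List.length_set] at hj
    rw [hget, List.length_set]
    by_cases h : j = i
    · subst h; rw [if_pos rfl]; exact ⟨hgl, Or.inr hdg⟩
    · rw [if_neg h]; exact hM j hj
  · intro j r hj hjr
    induction hn : d j using Nat.strong_induction_on generalizing j with
    | _ N ih =>
    subst hn
    by_cases hroot : p.getD j 0 = j
    · have hrj : r = j := isRootOf_unique hjr ⟨0, rfl, hroot⟩
      subst hrj
      have hji : r ≠ i := fun h => hni (h ▸ hroot)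
      exact ⟨0, rfl, by rw [hget, if_neg hji]; exact hroot⟩
    · have hjr' := isRootOf_step hjr
      have hlt : d (p.getD j 0) < d j := (hM j hj).2.resolve_left hroot
      by_cases hji : j = i
      · subst hji
        have hgr : IsRootOf p g r := hg ▸ isRootOf_step hjr'
        have := ih (d g) hdg g hgl hgr rfl
        exact isRootOf_cons (by rw [hget, if_pos rfl]; exact this)
      · have := ih (d (p.getD j 0)) hlt (p.getD j 0) (hM j hj).1 hjr' rfl
        exact isRootOf_cons (by rw [hget, if_neg hji]; exact this)

lemma iterate_set_of_dlt {p : List Nat} {d : Nat → Nat} (hM : Meas p d) {i v s : Nat}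
    (hs : s < p.length) (hlt : d s < d i) :
    ∀ t, (fp (p.set i v))^[t] s = (fp p)^[t] s := by
  intro t
  induction t with
  | zero => rfl
  | succ t ih =>
    rw [Function.iterate_succ_apply', Function.iterate_succ_apply', ih]
    have hnode := (d_anti hM hs t).2
    have hdn := (d_anti hM hs t).1
    have hne : (fp p)^[t] s ≠ i := fun h => by rw [h] at hdn; omega
    show (p.set i v).getD ((fp p)^[t] s) 0 = p.getD ((fp p)^[t] s) 0
    rw [getD_set', if_neg (fun hc => hne hc.1.symm)]

lemma find_spec : ∀ (fuel : Nat) (p : List Nat) (d : Nat → Nat) (i r k : Nat),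
    Meas p d → i < p.length → IsRootOf p i r → (fp p)^[k] i = r → k < fuel →
    (findA p i fuel).2 = r ∧ (findA p i fuel).1.length = p.length ∧
    Meas (findA p i fuel).1 d ∧
    (∀ j r', j < p.length → (IsRootOf p j r' ↔ IsRootOf (findA p i fuel).1 j r')) := by
  intro fuel
  induction fuel with
  | zero => intro p d i r k _ _ _ _ h; omega
  | succ fuel ih =>
    intro p d i r k hM hi hr hk hkf
    have hrr : p.getD r 0 = r := hr.choose_spec.2
    by_cases hroot : p.getD i 0 = i
    · have hri : r = i := isRootOf_unique hr ⟨0, rfl, hroot⟩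
      have heq : findA p i (fuel+1) = (p, i) := by simp only [findA]; rw [if_pos hroot]
      rw [heq]
      exact ⟨hri.symm, rfl, hM, fun j r' _ => Iff.rfl⟩
    · simp only [findA]; rw [if_neg hroot]
      set g := p.getD (p.getD i 0) 0 with hg
      set p' := p.set i g with hp'
      obtain ⟨hM', hfw⟩ := compress_preserve hM hi hroot
      have hlen' : p'.length = p.length := List.length_set ..
      have hi' : (p'.getD i 0) = g := by
        rw [hp', getD_set', if_pos ⟨rfl, hi⟩]
      -- facts about g
      have hpi : p.getD i 0 < p.length := (hM i hi).1
      have hdpi : d (p.getD i 0) < d i := (hM i hi).2.resolve_left hroot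
      have hgl : g < p.length := (hM _ hpi).1
      have hdg : d g < d i := by
        rcases (hM _ hpi).2 with h | h
        · rw [hg, h]; exact hdpi
        · exact lt_trans h hdpi
      -- root of g in p', and chain bound
      have hgr : IsRootOf p g r := hg ▸ isRootOf_step (isRootOf_step hr)
      have hgr' : IsRootOf p' g r := hfw g r hgl hgr
      -- chain from g in p reaches r within k-1 steps
      have hkpos : 1 ≤ k := by
        by_contra h
        have hk0 : k = 0 := by omega
        subst hk0
        simp only [Function.iterate_zero, id] at hk
        subst hk
        exact hroot hrr
      have hchain : ∃ k2, k2 < fuel ∧ (fp p')^[k2] g = r := by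
        have h1 : (fp p)^[k-1] (p.getD i 0) = r := by
          have : (fp p)^[(k-1)+1] i = r := by rw [Nat.sub_add_cancel hkpos]; exact hk
          rw [Function.iterate_succ_apply] at this; exact this
        by_cases hpir : p.getD (p.getD i 0) 0 = p.getD i 0
        · -- p.getD i 0 is a root, so g = p.getD i 0 = r
          have : IsRootOf p (p.getD i 0) (p.getD i 0) := ⟨0, rfl, hpir⟩
          have hreq : p.getD i 0 = r := isRootOf_unique this (isRootOf_step hr)
          have : g = r := by rw [hg, hpir, hreq]
          exact ⟨0, by omega, this⟩
        · -- k ≥ 2, chain from g has length k-2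
          have hk1pos : 1 ≤ k - 1 := by
            by_contra h
            have he : k - 1 = 0 := by omega
            rw [he] at h1
            simp only [Function.iterate_zero, id] at h1
            exact hpir (by rw [h1]; exact hrr)
          have h2 : (fp p)^[k-2] g = r := by
            have : (fp p)^[(k-2)+1] (p.getD i 0) = r := by
              have e : (k-2)+1 = k-1 := by omega
              rw [e]; exact h1
            rw [Function.iterate_succ_apply] at this
            exact this
          refine ⟨k - 2, by omega, ?_⟩
          rw [iterate_set_of_dlt hM hgl hdg]
          exact h2
      obtain ⟨k2, hk2f, hk2⟩ := hchain
      have := ih p' d g r k2 hM' (hlen' ▸ hgl) hgr' hk2 hk2f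
      rw [hi']
      refine ⟨this.1, by rw [this.2.1, hlen'], this.2.2.1, ?_⟩
      intro j r' hj
      constructor
      · intro h
        exact (this.2.2.2 j r' (hlen' ▸ hj)).1 (hfw j r' hj h)
      · intro h
        obtain ⟨r0, hr0, _⟩ := roots_exist hM j hj
        have : IsRootOf (findA p' (p'.getD i 0) fuel).1 j r0 := by
          rw [hi']
          exact (this.2.2.2 j r0 (hlen' ▸ hj)).1 (hfw j r0 hj hr0)
        have := isRootOf_unique h (hi' ▸ this)
        exact this ▸ hr0

lemma link_preserve {p : List Nat} {d : Nat → Nat} (hM : Meas p d) {ra rb : Nat}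
    (hra : p.getD ra 0 = ra) (hrb : p.getD rb 0 = rb)
    (hal : ra < p.length) (hbl : rb < p.length) (hne : ra ≠ rb) :
    (∃ d', Meas (p.set ra rb) d') ∧
    (∀ j r, j < p.length → IsRootOf p j r →
      IsRootOf (p.set ra rb) j (if r = ra then rb else r)) := by
  have hget : ∀ j, (p.set ra rb).getD j 0 = if j = ra then rb else p.getD j 0 := by
    intro j
    rw [getD_set']
    by_cases h : j = ra
    · simp [h, hal]
    · rw [if_neg (fun hc => h hc.1.symm), if_neg h]
  have htrans : ∀ j, j < p.length → p.getD j 0 ≠ j →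
      (IsRootOf p (p.getD j 0) ra ↔ IsRootOf p j ra) :=
    fun j _ _ => ⟨isRootOf_cons, isRootOf_step⟩
  have hnra : ¬ IsRootOf p rb ra := fun h => hne (isRootOf_unique ⟨0, rfl, hrb⟩ h).symm
  constructor
  · refine ⟨fun x => @dite _ (IsRootOf p x ra) (Classical.propDecidable _)
      (fun _ => d x + d rb + 1) (fun _ => d x), ?_⟩
    intro j hj
    rw [List.length_set] at hj
    rw [hget, List.length_set]
    by_cases hj_ra : j = ra
    · subst hj_ra
      rw [if_pos rfl]
      refine ⟨hbl, Or.inr ?_⟩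
      beta_reduce
      rw [dif_neg hnra, dif_pos ⟨0, rfl, hra⟩]
      omega
    · rw [if_neg hj_ra]
      refine ⟨(hM j hj).1, ?_⟩
      rcases (hM j hj).2 with h | h
      · exact Or.inl h
      · refine Or.inr ?_
        beta_reduce
        by_cases hsr : IsRootOf p j ra
        · rw [dif_pos ((htrans j hj (by intro hc; rw [hc] at h; omega)).2 hsr), dif_pos hsr]
          omega
        · rw [dif_neg (fun hc => hsr ((htrans j hj (by intro hc2; rw [hc2] at h; omega)).1 hc)),
              dif_neg hsr]
          omega
  · intro j r hj hjr
    induction hn : d j using Nat.strong_induction_on generalizing j with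
    | _ N ih =>
    subst hn
    by_cases hroot : p.getD j 0 = j
    · have hrj : r = j := isRootOf_unique hjr ⟨0, rfl, hroot⟩
      by_cases hjra : j = ra
      · rw [if_pos (hrj.trans hjra)]
        refine ⟨1, ?_, ?_⟩
        · rw [Function.iterate_one]
          show (p.set ra rb).getD j 0 = rb
          rw [hget, if_pos hjra]
        · show (p.set ra rb).getD rb 0 = rb
          rw [hget, if_neg (Ne.symm hne)]
          exact hrb
      · rw [if_neg (fun h => hjra (hrj.symm.trans h))]
        refine ⟨0, hrj.symm, ?_⟩
        show (p.set ra rb).getD r 0 = r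
        rw [hget, if_neg (fun h => hjra (hrj.symm.trans h))]
        rw [hrj]
        exact hroot
    · have hjne : j ≠ ra := fun h => hroot (h ▸ hra)
      have hlt : d (p.getD j 0) < d j := (hM j hj).2.resolve_left hroot
      have := ih (d (p.getD j 0)) hlt (p.getD j 0) (hM j hj).1 (isRootOf_step hjr) rfl
      exact isRootOf_cons (by rw [hget, if_neg hjne]; exact this)


lemma union_step {p comp : List Nat} {mn a b : Nat} (hInv : UFSim p comp mn)
    (ha : a < mn) (hb : b < mn) :
    ((unionA p a b).2 = (comp.getD a 0 == comp.getD b 0)) ∧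
    ((unionA p a b).2 = false →
      UFSim (unionA p a b).1
        (comp.map fun c => if c = comp.getD a 0 then comp.getD b 0 else c) mn) := by
  obtain ⟨hlp, hlc, ⟨d, hM⟩, hAg⟩ := hInv
  have hal : a < p.length := by omega
  have hbl : b < p.length := by omega
  obtain ⟨ra, hra, hral⟩ := roots_exist hM a hal
  obtain ⟨rb, hrb, hrbl⟩ := roots_exist hM b hbl
  obtain ⟨k1, hk1len, hk1⟩ := chain_short hM hal hra
  have F1 := find_spec p.length p d a ra k1 hM hal hra hk1 hk1len
  have hlen1 : (findA p a p.length).1.length = p.length := F1.2.1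
  have hM1 : Meas (findA p a p.length).1 d := F1.2.2.1
  have hrb1 : IsRootOf (findA p a p.length).1 b rb := (F1.2.2.2 b rb hbl).1 hrb
  obtain ⟨k2, hk2len, hk2⟩ := chain_short hM1 (by rw [hlen1]; exact hbl) hrb1
  have F2 := find_spec (findA p a p.length).1.length (findA p a p.length).1 d b rb k2
    hM1 (by rw [hlen1]; exact hbl) hrb1 hk2 hk2len
  have hlen2 : (findA (findA p a p.length).1 b (findA p a p.length).1.length).1.length
      = p.length := by rw [F2.2.1, hlen1]
  have hM2 : Meas (findA (findA p a p.length).1 b (findA p a p.length).1.length).1 d := F2.2.2.1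
  have hiff : ∀ j r, j < p.length → (IsRootOf p j r ↔
      IsRootOf (findA (findA p a p.length).1 b (findA p a p.length).1.length).1 j r) :=
    fun j r hj => (F1.2.2.2 j r hj).trans (F2.2.2.2 j r (by rw [hlen1]; exact hj))
  set p2 := (findA (findA p a p.length).1 b (findA p a p.length).1.length).1 with hp2
  have hu : unionA p a b = (p2.set ra rb, ra == rb) := by
    show ((findA (findA p a p.length).1 b (findA p a p.length).1.length).1.set
        (findA p a p.length).2
        (findA (findA p a p.length).1 b (findA p a p.length).1.length).2,
        ((findA p a p.length).2 ==
          (findA (findA p a p.length).1 b (findA p a p.length).1.length).2)) = _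
    rw [F1.1, F2.1]
  have hsame : ra = rb ↔ comp.getD a 0 = comp.getD b 0 :=
    (same_root_iff hra hrb).symm.trans (hAg a b ha hb)
  constructor
  · rw [hu]
    show (ra == rb) = (comp.getD a 0 == comp.getD b 0)
    by_cases h : ra = rb
    · rw [h, hsame.mp h]; simp
    · rw [beq_eq_false_iff_ne.mpr h,
          beq_eq_false_iff_ne.mpr (fun hc => h (hsame.mpr hc))]
  · intro hfalse
    rw [hu] at hfalse ⊢
    have hne : ra ≠ rb := by
      intro h; rw [h] at hfalse; simp at hfalse
    have hra2 : IsRootOf p2 a ra := (hiff a ra hal).1 hra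
    have hrb2 : IsRootOf p2 b rb := (hiff b rb hbl).1 hrb
    have hra2r : p2.getD ra 0 = ra := hra2.choose_spec.2
    have hrb2r : p2.getD rb 0 = rb := hrb2.choose_spec.2
    obtain ⟨hM3, hmap⟩ := link_preserve hM2 hra2r hrb2r (by rw [hlen2]; exact hral) (by rw [hlen2]; exact hrbl) hne
    refine ⟨by rw [List.length_set]; omega, by rw [List.length_map]; omega, hM3, ?_⟩
    intro x y hx hy
    have hxl : x < p.length := by omega
    have hyl : y < p.length := by omega
    obtain ⟨rx, hrx, _⟩ := roots_exist hM x hxl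
    obtain ⟨ry, hry, _⟩ := roots_exist hM y hyl
    have hrx3 : IsRootOf (p2.set ra rb) x (if rx = ra then rb else rx) :=
      hmap x rx (by rw [hlen2]; exact hxl) ((hiff x rx hxl).1 hrx)
    have hry3 : IsRootOf (p2.set ra rb) y (if ry = ra then rb else ry) :=
      hmap y ry (by rw [hlen2]; exact hyl) ((hiff y ry hyl).1 hry)
    rw [same_root_iff hrx3 hry3,
        getD_map_of_lt _ comp x (by omega), getD_map_of_lt _ comp y (by omega)]
    have cxa : comp.getD x 0 = comp.getD a 0 ↔ rx = ra :=
      (hAg x a hx ha).symm.trans (same_root_iff hrx hra)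
    have cya : comp.getD y 0 = comp.getD a 0 ↔ ry = ra :=
      (hAg y a hy ha).symm.trans (same_root_iff hry hra)
    have cxb : comp.getD x 0 = comp.getD b 0 ↔ rx = rb :=
      (hAg x b hx hb).symm.trans (same_root_iff hrx hrb)
    have cyb : comp.getD y 0 = comp.getD b 0 ↔ ry = rb :=
      (hAg y b hy hb).symm.trans (same_root_iff hry hrb)
    have cxy : comp.getD x 0 = comp.getD y 0 ↔ rx = ry :=
      (hAg x y hx hy).symm.trans (same_root_iff hrx hry)
    by_cases hxa : rx = ra <;> by_cases hya : ry = ra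
    · rw [if_pos hxa, if_pos hya, if_pos (cxa.mpr hxa), if_pos (cya.mpr hya)]
      simp
    · rw [if_pos hxa, if_neg hya, if_pos (cxa.mpr hxa), if_neg (fun hc => hya (cya.mp hc))]
      constructor
      · intro h; exact (cyb.mpr h.symm).symm
      · intro h; exact (cyb.mp h.symm).symm
    · rw [if_neg hxa, if_pos hya, if_neg (fun hc => hxa (cxa.mp hc)), if_pos (cya.mpr hya)]
      exact ⟨fun h => cxb.mpr h, fun h => cxb.mp h⟩
    · rw [if_neg hxa, if_neg hya, if_neg (fun hc => hxa (cxa.mp hc)),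
          if_neg (fun hc => hya (cya.mp hc))]
      exact cxy.symm

lemma goB_cons (comp : List Nat) (a b : Nat) (es : List (Nat × Nat)) :
    goB comp ((a, b) :: es) = if comp.getD a 0 = comp.getD b 0 then true
      else goB (comp.map fun c => if c = comp.getD a 0 then comp.getD b 0 else c) es := rfl

lemma sim_right (grid : List (List String)) (m n i j : Nat) (rest : List (Nat × Nat))
    (hi : i < m) (hj : j < n)
    (ih : ∀ p comp, UFSim p comp (m*n) →
      goA grid m n p rest = goB comp (rest.flatMap (cellEdges grid m n))) :
    ∀ p comp, UFSim p comp (m*n) →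
    (if (cellRight grid n p i j).2 then true else goA grid m n (cellRight grid n p i j).1 rest)
    = goB comp ((if j + 1 < n ∧ pvGet grid i (j+1) = pvGet grid i j
        then [(i*n+j, i*n+j+1)] else []) ++ rest.flatMap (cellEdges grid m n)) := by
  intro p comp hInv
  by_cases hR : j + 1 < n ∧ pvGet grid i (j+1) = pvGet grid i j
  · have hcr : cellRight grid n p i j = unionA p (i*n+j) (i*n+j+1) := by
      rw [cellRight, if_pos ⟨by omega, hR.2⟩]
    have hb1 : i*n+j < m*n := cell_lt hi hj
    have hb2 : i*n+j+1 < m*n := by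
      have := cell_lt hi (show j+1 < n by omega)
      omega
    have US := union_step hInv hb1 hb2
    rw [hcr, if_pos hR, List.cons_append, goB_cons]
    by_cases hca : comp.getD (i*n+j) 0 = comp.getD (i*n+j+1) 0
    · rw [if_pos hca]
      have : (unionA p (i*n+j) (i*n+j+1)).2 = true := by rw [US.1]; exact beq_iff_eq.mpr hca
      rw [this]
      simp
    · rw [if_neg hca]
      have hfl : (unionA p (i*n+j) (i*n+j+1)).2 = false := by
        rw [US.1]; exact beq_eq_false_iff_ne.mpr hca
      rw [hfl]
      simp only [Bool.false_eq_true, if_false]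
      exact ih _ _ (US.2 hfl)
  · have hcr2 : cellRight grid n p i j = (p, false) := by
      rw [cellRight]
      exact if_neg (fun hc => hR ⟨by have := hc.1; omega, hc.2⟩)
    rw [hcr2, if_neg hR]
    simp only [Bool.false_eq_true, if_false, List.nil_append]
    exact ih p comp hInv

lemma goA_cons (grid : List (List String)) (m n i j : Nat) (p : List Nat)
    (rest : List (Nat × Nat)) :
    goA grid m n p ((i, j) :: rest)
    = (if (cellDown grid m n p i j).2 then true
       else if (cellRight grid n (cellDown grid m n p i j).1 i j).2 then true
       else goA grid m n (cellRight grid n (cellDown grid m n p i j).1 i j).1 rest) := rfl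

lemma sim (grid : List (List String)) (m n : Nat) :
    ∀ (cells : List (Nat × Nat)) (p comp : List Nat),
    (∀ c ∈ cells, c.1 < m ∧ c.2 < n) → UFSim p comp (m*n) →
    goA grid m n p cells = goB comp (cells.flatMap (cellEdges grid m n)) := by
  intro cells
  induction cells with
  | nil => intro p comp _ _; rfl
  | cons c rest ih =>
    obtain ⟨i, j⟩ := c
    intro p comp hbd hInv
    obtain ⟨hi, hj⟩ := hbd (i, j) (List.mem_cons_self ..)
    have hbd' : ∀ c ∈ rest, c.1 < m ∧ c.2 < n := fun c hc => hbd c (List.mem_cons_of_mem _ hc)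
    have ih' : ∀ p comp, UFSim p comp (m*n) →
        goA grid m n p rest = goB comp (rest.flatMap (cellEdges grid m n)) :=
      fun p comp h => ih p comp hbd' h
    rw [goA_cons, List.flatMap_cons, cellEdges, List.append_assoc]
    by_cases hD : i + 1 < m ∧ pvGet grid (i+1) j = pvGet grid i j
    · have hcd : cellDown grid m n p i j = unionA p (i*n+j) (i*n+j+n) := by
        rw [cellDown, if_pos ⟨by omega, hD.2⟩]
      have hidx : (i+1)*n+j = i*n+j+n := by rw [Nat.succ_mul]; omega
      have hb1 : i*n+j < m*n := cell_lt hi hj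
      have hb2 : i*n+j+n < m*n := by rw [← hidx]; exact cell_lt hD.1 hj
      have US := union_step hInv hb1 hb2
      rw [if_pos hD, hcd, List.cons_append, goB_cons, hidx]
      by_cases hca : comp.getD (i*n+j) 0 = comp.getD (i*n+j+n) 0
      · rw [if_pos hca]
        have : (unionA p (i*n+j) (i*n+j+n)).2 = true := by rw [US.1]; exact beq_iff_eq.mpr hca
        rw [this]
        simp
      · rw [if_neg hca]
        have hfl : (unionA p (i*n+j) (i*n+j+n)).2 = false := by
          rw [US.1]; exact beq_eq_false_iff_ne.mpr hca
        rw [hfl]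
        simp only [Bool.false_eq_true, if_false]
        exact sim_right grid m n i j rest hi hj ih' _ _ (US.2 hfl)
    · have hcd : cellDown grid m n p i j = (p, false) := by
        rw [cellDown]
        exact if_neg (fun hc => hD ⟨by have := hc.1; omega, hc.2⟩)
      rw [if_neg hD, hcd]
      simp only [Bool.false_eq_true, if_false, List.nil_append]
      exact sim_right grid m n i j rest hi hj ih' p comp hInv

lemma edgesB_eq (grid : List (List String)) (m n : Nat) :
    edgesB grid m n = (cellsList m n).flatMap (cellEdges grid m n) := by
  simp [edgesB, cellsList, List.flatMap_assoc, List.flatMap_map]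

lemma inv_init (mn : Nat) : UFSim (List.range (mn+1)) (List.range mn) mn := by
  refine ⟨by simp, by simp, ⟨fun _ => 0, ?_⟩, ?_⟩
  · intro i hi
    rw [List.length_range] at hi
    rw [getD_range_of_lt hi]
    exact ⟨by simpa using hi, Or.inl rfl⟩
  · intro a b hA hB
    have hroot : ∀ x, x < mn → IsRootOf (List.range (mn+1)) x x :=
      fun x hx => ⟨0, rfl, getD_range_of_lt (by omega)⟩
    rw [getD_range_of_lt hA, getD_range_of_lt hB]
    constructor
    · rintro ⟨r, h1, h2⟩
      rw [← isRootOf_unique h1 (hroot a hA), ← isRootOf_unique h2 (hroot b hB)]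
    · rintro rfl
      exact ⟨a, hroot a hA, hroot a hA⟩

-- ===== VERDICT (by name: the statement is the Claim_ definition above) =====
theorem doit_disjoint_spec : Claim_equal_doit_disjoint := by
  intro grid _ _
  unfold Spec_doit_disjoint doit_disjoint doit_disjoint_alt
  show goA grid grid.length grid.headI.length (List.range (grid.headI.length * grid.length + 1))
        (cellsList grid.length grid.headI.length)
      = goB (List.range (grid.length * grid.headI.length))
        (edgesB grid grid.length grid.headI.length)
  rw [edgesB_eq, Nat.mul_comm grid.headI.length grid.length]
  exact sim grid _ _ _ _ _ (by
    intro c hc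
    simp only [cellsList, List.mem_flatMap, List.mem_map, List.mem_range] at hc
    obtain ⟨i, hi, j, hj, rfl⟩ := hc
    exact ⟨hi, hj⟩) (inv_init _)
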